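-- pv_equiv track=rewrite | github.com/SECQUOIA/dsda-gdp | misc/gdp/column/dsda_gdp_column.py | list_generator
-- ===== SOURCE A (Python) =====
-- def list_generator(NT):
--     X1, X2, aux, aux2, x = [], [], [], 2, {}
--
--     for i in range(2, NT):
--         X1.append(i)
--         aux.append(i)
--         X2.append(aux2)
--
--     for i in range(NT-2):
--         aux.pop(0)
--         aux2 += 1
--         for j in aux:
--             X1.append(j)
--             X2.append(aux2)
--     return X1, X2
-- ===== SOURCE B (Python) =====
-- def list_generator(NT):
--     X1, X2 = [], []
--     for v in range(2, NT):
--         for j in range(v, NT):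
--             X1.append(j)
--             X2.append(v)
--     return X1, X2
-- ===== Notes on version B (the rewrite author's own statement) =====
-- stated objective: simpler
-- what changed: Replaces A's two-phase construction (a seed loop plus a loop that repeatedly pops the front of a maintained aux list while counting with aux2) by one uniform nested loop over (v, j) pairs, with no auxiliary list, counter, or unused dict.
import Mathlib
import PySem

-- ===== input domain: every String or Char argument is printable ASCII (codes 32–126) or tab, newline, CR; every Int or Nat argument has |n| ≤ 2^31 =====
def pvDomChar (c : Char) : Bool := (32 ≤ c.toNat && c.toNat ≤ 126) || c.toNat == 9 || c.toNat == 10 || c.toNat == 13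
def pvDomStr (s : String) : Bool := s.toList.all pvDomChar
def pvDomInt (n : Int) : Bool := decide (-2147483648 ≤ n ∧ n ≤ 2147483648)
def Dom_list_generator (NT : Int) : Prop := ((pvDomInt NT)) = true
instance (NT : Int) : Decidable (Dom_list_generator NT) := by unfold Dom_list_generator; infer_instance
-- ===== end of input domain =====

-- B drops A's pop-from-front aux-list machinery for one uniform nested loop over (v, j) pairs (objective: simpler).

-- ===== PORT A =====
-- A-side helper: the body of A's second for-loop (its loop variable i is unused)
def pvStepA (s : List Int × List Int × List Int × Int) : List Int × List Int × List Int × Int :=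
  match PySem.List.pop? s.2.2.1 0 with
  | none => s  -- aux.pop(0) never raises: aux holds NT-2 elements and is popped NT-2 times
  | some (_, aux') =>
    let aux2' := s.2.2.2 + 1
    let t := aux'.foldl (fun u j => (u.1 ++ [j], u.2 ++ [aux2'])) (s.1, s.2.1)
    (t.1, t.2, aux', aux2')

def list_generator (NT : Int) : List Int × List Int :=
  -- state: (X1, X2, aux, aux2); the dict x is created and never used, so it is omitted
  let s0 : List Int × List Int × List Int × Int :=
    (PySem.List.pyRange 2 NT 1).foldl
      (fun s i => (s.1 ++ [i], s.2.1 ++ [s.2.2.2], s.2.2.1 ++ [i], s.2.2.2))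
      ([], [], [], 2)
  let s1 := (PySem.List.pyRange 0 (NT - 2) 1).foldl (fun s _ => pvStepA s) s0
  (s1.1, s1.2.1)

-- ===== PORT B =====
def list_generator_alt (NT : Int) : List Int × List Int :=
  (PySem.List.pyRange 2 NT 1).foldl
    (fun s v => (PySem.List.pyRange v NT 1).foldl (fun u j => (u.1 ++ [j], u.2 ++ [v])) s)
    ([], [])

-- ===== PRECONDITION & SPEC =====
def Spec_list_generator (NT : Int) (out : List Int × List Int) : Prop := out = list_generator_alt NT
instance (NT : Int) (out : List Int × List Int) : Decidable (Spec_list_generator NT out) := by unfold Spec_list_generator; infer_instance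

-- ===== CLAIM (what is proved, stated in full; the proofs are below) =====
def Claim_equal_list_generator : Prop := ∀ (NT : Int), Dom_list_generator NT → Spec_list_generator NT (list_generator NT)

-- ===== LEMMAS AND PROOFS =====

-- B's fold, parameterised by the range bounds (proof-side generalisation of list_generator_alt)
def pvBf (lo hi : Int) (s : List Int × List Int) : List Int × List Int :=
  (PySem.List.pyRange lo hi 1).foldl
    (fun s v => (PySem.List.pyRange v hi 1).foldl (fun u j => (u.1 ++ [j], u.2 ++ [v])) s) s

lemma pv_foldl_ignore {α β : Type} (g : α → α) (l : List β) (s : α) :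
    l.foldl (fun s _ => g s) s = g^[l.length] s := by
  induction l generalizing s with
  | nil => rfl
  | cons b l ih => simp [List.foldl, ih, Function.iterate_succ_apply]

lemma pv_innerfold (v : Int) (l : List Int) (t : List Int × List Int) :
    l.foldl (fun u j => (u.1 ++ [j], u.2 ++ [v])) t = (t.1 ++ l, t.2 ++ l.map (fun _ => v)) := by
  induction l generalizing t with
  | nil => simp
  | cons x l ih => simp [List.foldl, ih]

lemma pv_firstloop (l : List Int) (X1 X2 aux : List Int) (c : Int) :
    l.foldl (fun s i => (s.1 ++ [i], s.2.1 ++ [s.2.2.2], s.2.2.1 ++ [i], s.2.2.2)) (X1, X2, aux, c)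
      = (X1 ++ l, X2 ++ l.map (fun _ => c), aux ++ l, c) := by
  induction l generalizing X1 X2 aux with
  | nil => simp
  | cons x l ih => simp [List.foldl, ih]

lemma pv_loopA (m : Nat) : ∀ (a : Int) (X1 X2 : List Int),
    pvStepA^[m] (X1, X2, PySem.List.pyRange a (a + m) 1, a)
      = ((pvBf (a+1) (a + m) (X1, X2)).1, (pvBf (a+1) (a + m) (X1, X2)).2, ([] : List Int), a + m) := by
  induction m with
  | zero =>
    intro a X1 X2
    simp [pvBf, PySem.List.pyRange_one_eq_nil (show (a:Int) ≤ a + 1 by omega)]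
  | succ m ih =>
    intro a X1 X2
    rw [Function.iterate_succ_apply]
    have hcons : PySem.List.pyRange a (a + (↑(m+1) : Int)) 1
        = a :: PySem.List.pyRange (a+1) (a + (↑(m+1) : Int)) 1 :=
      PySem.List.pyRange_one_cons (by push_cast; omega)
    have hstep : pvStepA (X1, X2, PySem.List.pyRange a (a + (↑(m+1) : Int)) 1, a)
        = (((PySem.List.pyRange (a+1) (a + (↑(m+1) : Int)) 1).foldl
              (fun u j => (u.1 ++ [j], u.2 ++ [a+1])) (X1, X2)).1,
           ((PySem.List.pyRange (a+1) (a + (↑(m+1) : Int)) 1).foldl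
              (fun u j => (u.1 ++ [j], u.2 ++ [a+1])) (X1, X2)).2,
           PySem.List.pyRange (a+1) (a + (↑(m+1) : Int)) 1, a + 1) := by
      rw [pvStepA, hcons]
      simp [PySem.List.pop?_zero_cons]
    rw [hstep]
    have hshift : (a : Int) + (↑(m+1) : Int) = (a + 1) + ↑m := by push_cast; ring
    set t := (PySem.List.pyRange (a+1) (a + (↑(m+1) : Int)) 1).foldl
      (fun u j => (u.1 ++ [j], u.2 ++ [a+1])) (X1, X2) with ht
    have hr : PySem.List.pyRange (a+1) (a + (↑(m+1) : Int)) 1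
        = PySem.List.pyRange (a+1) ((a+1) + (↑m : Int)) 1 := by rw [hshift]
    rw [hr, ih (a+1) t.1 t.2]
    have hBf : pvBf (a+1) (a + (↑(m+1) : Int)) (X1, X2) = pvBf (a+1+1) ((a+1) + (↑m : Int)) (t.1, t.2) := by
      rw [pvBf, pvBf, ht, hshift]
      rcases Nat.eq_zero_or_pos m with hm | hm
      · subst hm
        push_cast
        rw [PySem.List.pyRange_one_eq_nil (show (a:Int)+1+0 ≤ a + 1 by omega),
            PySem.List.pyRange_one_eq_nil (show (a:Int)+1+0 ≤ a + 1 + 1 by omega)]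
        simp
      · have hcons2 : PySem.List.pyRange (a+1) ((a+1) + (↑m : Int)) 1
            = (a+1) :: PySem.List.pyRange (a+1+1) ((a+1) + (↑m : Int)) 1 :=
          PySem.List.pyRange_one_cons (by omega)
        rw [hcons2, List.foldl_cons, hcons2]
    rw [hBf, hshift]

theorem pv_main (NT : Int) : list_generator NT = list_generator_alt NT := by
  have halt : list_generator_alt NT = pvBf 2 NT ([], []) := rfl
  rw [list_generator, halt]
  rw [pv_firstloop, pv_foldl_ignore, PySem.List.length_pyRange_one]
  by_cases h : NT ≤ 2
  · have h0 : (NT - 2 - 0).toNat = 0 := by omega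
    have hnil : PySem.List.pyRange 2 NT 1 = [] := PySem.List.pyRange_one_eq_nil (by omega)
    rw [h0, hnil, pvBf, hnil]
    simp [Function.iterate_zero]
  · set m := (NT - 2 - 0).toNat with hmdef
    have hNT : NT = 2 + (↑m : Int) := by omega
    rw [hNT]
    have hstate : (([] : List Int) ++ PySem.List.pyRange 2 ((2:Int) + ↑m) 1,
        ([] : List Int) ++ (PySem.List.pyRange 2 ((2:Int) + ↑m) 1).map (fun _ => (2:Int)),
        ([] : List Int) ++ PySem.List.pyRange 2 ((2:Int) + ↑m) 1, (2:Int))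
        = (PySem.List.pyRange 2 ((2:Int) + ↑m) 1,
           (PySem.List.pyRange 2 ((2:Int) + ↑m) 1).map (fun _ => (2:Int)),
           PySem.List.pyRange 2 ((2:Int) + ↑m) 1, (2:Int)) := by simp
    rw [hstate, pv_loopA m 2 _ _]
    have hcons : PySem.List.pyRange 2 ((2:Int) + ↑m) 1
        = 2 :: PySem.List.pyRange (2+1) ((2:Int) + ↑m) 1 :=
      PySem.List.pyRange_one_cons (by omega)
    conv_rhs => rw [pvBf, hcons, List.foldl_cons]
    rw [pv_innerfold]
    simp
    rw [pvBf]

-- ===== VERDICT (by name: the statement is the Claim_ definition above) =====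
theorem list_generator_spec : Claim_equal_list_generator := by
  intro NT _
  exact pv_main NT
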